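-- pv_equiv track=rewrite | github.com/ag-su/coding_test | programmers/level2/기능개발.py | solution
-- ===== SOURCE A (Python) =====
-- import math
-- import math
--
-- def solution(progresses, speeds):
--     answer = []
--     day_list = []
--     for progress, speed in zip(progresses, speeds):
--         day_list.append(math.ceil((100-progress) / speed))
--
--     while True:
--         count = 1
--
--         if len(day_list) == 0:
--             break
--
--         pop_num = day_list.pop(0)
--         for _ in range(len(day_list)):
--             if pop_num >= day_list[0]:
--                 day_list.pop(0)
--                 count += 1
--             else:
--                 break
--
--         answer.append(count)
--
--     return answer
-- ===== SOURCE B (Python) =====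
-- def solution(progresses, speeds):
--     days = [-(-(100 - p) // s) for p, s in zip(progresses, speeds)]
--     answer = []
--     leader = 0
--     count = 0
--     for d in days:
--         if count == 0 or d > leader:
--             if count:
--                 answer.append(count)
--             leader = d
--             count = 1
--         else:
--             count += 1
--     if count:
--         answer.append(count)
--     return answer
-- ===== Notes on version B (the rewrite author's own statement) =====
-- stated objective: faster
-- what changed: Replaces the quadratic pop(0)-based grouping loop with a single forward scan that tracks the current group leader and a running count (and exact integer ceiling division instead of float math.ceil, equal on the stated domain).
import Mathlib
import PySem

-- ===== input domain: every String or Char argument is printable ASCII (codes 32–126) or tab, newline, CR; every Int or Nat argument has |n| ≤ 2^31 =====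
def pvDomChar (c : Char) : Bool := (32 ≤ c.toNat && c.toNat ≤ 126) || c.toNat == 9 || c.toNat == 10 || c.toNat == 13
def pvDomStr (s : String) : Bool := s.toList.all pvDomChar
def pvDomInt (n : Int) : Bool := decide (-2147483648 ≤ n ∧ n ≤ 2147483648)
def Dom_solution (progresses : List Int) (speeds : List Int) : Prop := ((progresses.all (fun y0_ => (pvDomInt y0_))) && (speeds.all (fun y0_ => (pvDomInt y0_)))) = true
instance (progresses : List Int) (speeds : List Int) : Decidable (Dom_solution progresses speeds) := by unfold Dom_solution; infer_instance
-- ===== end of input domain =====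

-- B replaces A's quadratic pop(0)-based grouping with one forward scan tracking the
-- current group leader and count (objective: faster, O(n) vs O(n^2)).

-- ===== PORT A =====
-- math.ceil((100-progress)/speed): on Dom (|ints| ≤ 2^31, speed ≠ 0 by Pre_) Python's
-- float division is exact enough that the float ceil equals the integer ceiling
-- -((-(100-progress)) // speed); ported as that integer ceiling.
def ceilDivA (a b : Int) : Int := -(PySem.Int.floordiv (-a) b)

-- the first for-loop of A: build day_list by appending
def dayListA (pairs : List (Int × Int)) : List Int :=
  pairs.foldl (fun acc ps => acc ++ [ceilDivA (100 - ps.1) ps.2]) []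

-- the inner for-loop of A: pop leading elements ≤ pop_num, counting (count starts at 1)
def popRunA (d : Int) : List Int → Int × List Int
  | [] => (1, [])
  | x :: xs => if d ≥ x then ((popRunA d xs).1 + 1, (popRunA d xs).2) else (1, x :: xs)

theorem popRunA_len (d : Int) (l : List Int) : (popRunA d l).2.length ≤ l.length := by
  induction l with
  | nil => simp [popRunA]
  | cons x xs ih => simp only [popRunA]; split <;> simp_all <;> omega

-- the while-loop of A
def whileA : List Int → List Int
  | [] => []
  | d :: rest => (popRunA d rest).1 :: whileA (popRunA d rest).2
termination_by l => l.length
decreasing_by have := popRunA_len d rest; simp; omega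

def solution (progresses : List Int) (speeds : List Int) : List Int :=
  whileA (dayListA (progresses.zip speeds))

-- ===== PORT B =====
-- days list by comprehension (integer ceiling -(-(100-p)//s))
def dayListB (progresses : List Int) (speeds : List Int) : List Int :=
  (progresses.zip speeds).map (fun ps => -(PySem.Int.floordiv (-(100 - ps.1)) ps.2))

-- single scan over days with state (answer, leader, count)
def scanB : List Int → List Int → Int → Int → List Int
  | [], ans, _, count => if count ≠ 0 then ans ++ [count] else ans
  | d :: rest, ans, leader, count =>
      if count = 0 ∨ d > leader then
        scanB rest (if count ≠ 0 then ans ++ [count] else ans) d 1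
      else
        scanB rest ans leader (count + 1)

def solution_alt (progresses : List Int) (speeds : List Int) : List Int :=
  scanB (dayListB progresses speeds) [] 0 0

-- ===== PRECONDITION & SPEC =====
-- Pre_ excludes exactly the inputs on which A raises ZeroDivisionError:
-- a zero among the speeds that are actually paired with a progress by zip.
def Pre_solution (progresses : List Int) (speeds : List Int) : Prop :=
  (0 : Int) ∉ speeds.take progresses.length
instance (progresses : List Int) (speeds : List Int) : Decidable (Pre_solution progresses speeds) := by
  unfold Pre_solution; infer_instance

def pvWitness_solution : List Int × List Int := ([30, 55], [1, 30])

def Spec_solution (progresses : List Int) (speeds : List Int) (out : List Int) : Prop := out = solution_alt progresses speeds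
instance (progresses : List Int) (speeds : List Int) (out : List Int) : Decidable (Spec_solution progresses speeds out) := by unfold Spec_solution; infer_instance

-- ===== CLAIM (what is proved, stated in full; the proofs are below) =====
def Claim_equal_solution : Prop := ∀ (progresses : List Int) (speeds : List Int), Dom_solution progresses speeds → Pre_solution progresses speeds → Spec_solution progresses speeds (solution progresses speeds)

-- ===== LEMMAS AND PROOFS =====

theorem dayListA_eq (progresses speeds : List Int) :
    dayListA (progresses.zip speeds) = dayListB progresses speeds := by
  unfold dayListA dayListB
  rw [PySem.List.foldl_append_singleton_eq_map]
  rfl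

-- key invariant: with a live group (count ≠ 0) led by L, scanB consumes exactly the run
-- popRunA consumes, then restarts fresh on the remainder
theorem scanB_popRun (rest : List Int) : ∀ (L c : Int) (ans : List Int), 0 < c →
    scanB rest ans L c = ans ++ [c + (popRunA L rest).1 - 1] ++ whileA (popRunA L rest).2 := by
  induction rest with
  | nil =>
      intro L c ans hc
      simp [scanB, popRunA, whileA, show c ≠ 0 by omega]
  | cons x xs ih =>
      intro L c ans hc
      by_cases hx : L ≥ x
      · have hnot : ¬ (c = 0 ∨ x > L) := by
          rintro (h | h) <;> omega
        simp only [scanB, popRunA, if_neg hnot, if_pos hx]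
        rw [ih L (c + 1) ans (by omega)]
        ring_nf
      · have hcond : (c = 0 ∨ x > L) := Or.inr (by omega)
        simp only [scanB, popRunA, if_pos hcond, if_neg hx, if_pos (show c ≠ 0 by omega)]
        rw [ih x 1 (ans ++ [c]) (by omega)]
        simp [whileA]

theorem scanB_eq_whileA (ds : List Int) : scanB ds [] 0 0 = whileA ds := by
  cases ds with
  | nil => simp [scanB, whileA]
  | cons d rest =>
      simp only [scanB, whileA]
      rw [if_pos (Or.inl trivial), if_neg (show ¬((0:Int) ≠ 0) by norm_num)]
      rw [scanB_popRun rest d 1 [] one_pos]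
      norm_num

-- ===== VERDICT (by name: the statement is the Claim_ definition above) =====
theorem solution_spec : Claim_equal_solution := by
  intro progresses speeds _ _
  unfold Spec_solution solution solution_alt
  rw [dayListA_eq, scanB_eq_whileA]
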